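-- pv_equiv track=rewrite | github.com/v-x-s/cs_assignements | Assignment7_vs9736.py | even_cols
-- ===== SOURCE A (Python) =====
-- def even_cols(matrix):
--
--     # setting an empty list for column values
--     columnList = []
--
--     # for loop to go through each column of the matrix
--     for column in range(len(matrix[0])):
--
--         # setting count to 0 after each loop
--         count = 0
--
--         # for loop to go through each row
--         for row in range(len(matrix)):
--
--             # checking to too see if each value equals to 1
--             if matrix[row][column] == 1:
--
--                 # adding to count if value equals to 1
--                 count += 1
--
--         # printing the column if number of 1's is even
--         if count % 2 == 0:
--             columnList.append(column)
--
--     # return the list containing all the column values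
--     return columnList
-- ===== SOURCE B (Python) =====
-- def even_cols(matrix):
--     # Row-major single pass maintaining a per-column count vector.
--     counts = [0] * len(matrix[0])
--     for row in matrix:
--         counts = [cnt + (row[c] == 1) for c, cnt in enumerate(counts)]
--     return [c for c, cnt in enumerate(counts) if cnt % 2 == 0]
-- ===== Notes on version B (the rewrite author's own statement) =====
-- stated objective: alternative
-- what changed: Replaced A's column-major nested loops (rescanning every row per column with a scalar count) by a single row-major pass that maintains a per-column count vector, then builds the result from the counts.
import Mathlib
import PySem

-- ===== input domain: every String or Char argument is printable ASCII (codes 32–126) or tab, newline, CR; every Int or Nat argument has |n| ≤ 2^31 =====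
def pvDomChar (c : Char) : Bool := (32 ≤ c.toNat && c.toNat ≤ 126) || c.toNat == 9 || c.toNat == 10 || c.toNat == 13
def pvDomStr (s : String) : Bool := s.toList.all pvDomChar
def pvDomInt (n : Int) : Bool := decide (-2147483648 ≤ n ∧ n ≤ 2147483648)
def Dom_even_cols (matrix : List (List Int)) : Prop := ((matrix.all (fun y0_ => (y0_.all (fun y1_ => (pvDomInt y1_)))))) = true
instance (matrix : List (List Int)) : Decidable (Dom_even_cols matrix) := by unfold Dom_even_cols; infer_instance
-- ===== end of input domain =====

-- B replaces A's column-rescanning nested loops by one row-major pass over the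
-- matrix maintaining a per-column count vector (objective: alternative).

-- ===== PORT A =====
def even_cols (matrix : List (List Int)) : List Int :=
  (PySem.List.pyRange 0 ((PySem.List.pyGetD matrix 0 ([] : List Int)).length : Int) 1).foldl
    (fun columnList column =>
      let count : Int :=
        (PySem.List.pyRange 0 (matrix.length : Int) 1).foldl
          (fun count row =>
            if PySem.List.pyGetD (PySem.List.pyGetD matrix row ([] : List Int)) column 0 = 1
            then count + 1 else count) 0
      if count % 2 = 0 then columnList ++ [column] else columnList)
    ([] : List Int)

-- ===== PORT B =====
def even_cols_alt (matrix : List (List Int)) : List Int :=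
  let counts : List Int :=
    matrix.foldl
      (fun counts row =>
        (PySem.List.enumerate counts).map
          (fun p => p.2 + (if PySem.List.pyGetD row p.1 0 = 1 then (1 : Int) else 0)))
      (List.replicate (PySem.List.pyGetD matrix 0 ([] : List Int)).length (0 : Int))
  (PySem.List.enumerate counts).filterMap
    (fun p => if p.2 % 2 = 0 then some p.1 else none)

-- ===== PRECONDITION & SPEC =====
-- Pre_ excludes exactly the inputs where A raises IndexError: the empty matrix
-- (matrix[0]) and ragged matrices with a row shorter than row 0.
def Pre_even_cols (matrix : List (List Int)) : Prop :=
  matrix ≠ [] ∧ ∀ row ∈ matrix, (PySem.List.pyGetD matrix 0 ([] : List Int)).length ≤ row.length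
instance (matrix : List (List Int)) : Decidable (Pre_even_cols matrix) := by
  unfold Pre_even_cols; infer_instance
def pvWitness_even_cols : List (List Int) := [[1, 0, 1], [0, 1, 1]]

def Spec_even_cols (matrix : List (List Int)) (out : List Int) : Prop := out = even_cols_alt matrix
instance (matrix : List (List Int)) (out : List Int) : Decidable (Spec_even_cols matrix out) := by unfold Spec_even_cols; infer_instance

-- ===== CLAIM (what is proved, stated in full; the proofs are below) =====
def Claim_equal_even_cols : Prop := ∀ (matrix : List (List Int)), Dom_even_cols matrix → Pre_even_cols matrix → Spec_even_cols matrix (even_cols matrix)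

-- ===== LEMMAS AND PROOFS =====

-- number of 1s in column c, as both programs effectively compute it
def countCol (matrix : List (List Int)) (c : Int) : Int :=
  (matrix.countP (fun row => decide (PySem.List.pyGetD row c 0 = 1)) : Int)

theorem countCol_nil (c : Int) : countCol [] c = 0 := by simp [countCol]

theorem countCol_cons (row : List Int) (rows : List (List Int)) (c : Int) :
    countCol (row :: rows) c
      = (if PySem.List.pyGetD row c 0 = 1 then (1 : Int) else 0) + countCol rows c := by
  by_cases h : PySem.List.pyGetD row c 0 = 1
  · simp [countCol, h]; ring
  · simp [countCol, h]

-- B's counts fold, starting from any range-indexed map, computes f + countCol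
theorem counts_fold_eq (rows : List (List Int)) (n : Nat) (f : Int → Int) :
    rows.foldl
      (fun counts row =>
        (PySem.List.enumerate counts).map
          (fun p => p.2 + (if PySem.List.pyGetD row p.1 0 = 1 then (1 : Int) else 0)))
      ((PySem.List.pyRange 0 (n : Int) 1).map f)
    = (PySem.List.pyRange 0 (n : Int) 1).map (fun j => f j + countCol rows j) := by
  induction rows generalizing f with
  | nil => simp [countCol_nil]
  | cons row rows ih =>
    rw [List.foldl_cons]
    have hstep :
        (PySem.List.enumerate ((PySem.List.pyRange 0 (n : Int) 1).map f)).map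
          (fun p => p.2 + (if PySem.List.pyGetD row p.1 0 = 1 then (1 : Int) else 0))
        = (PySem.List.pyRange 0 (n : Int) 1).map
            (fun j => f j + (if PySem.List.pyGetD row j 0 = 1 then (1 : Int) else 0)) := by
      rw [PySem.List.enumerate_eq_map_pyRange (d := (0 : Int))]
      simp only [PySem.List.len_eq, List.length_map, PySem.List.length_pyRange_one, List.map_map]
      have hlen : (((n : Int) - 0).toNat : Int) = (n : Int) := by omega
      rw [hlen]
      refine List.map_congr_left (fun j hj => ?_)
      rw [PySem.List.mem_pyRange_one] at hj
      simp only [Function.comp]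
      rw [PySem.List.pyGetD_map_pyRange_of_nonneg f (n : Int) j 0 hj.1 hj.2]
    rw [hstep, ih]
    refine List.map_congr_left (fun j _ => ?_)
    rw [countCol_cons]; ring

-- A's inner loop computes countCol
theorem inner_count_eq (matrix : List (List Int)) (c : Int) :
    (PySem.List.pyRange 0 (matrix.length : Int) 1).foldl
      (fun count row =>
        if PySem.List.pyGetD (PySem.List.pyGetD matrix row ([] : List Int)) c 0 = 1
        then count + 1 else count) 0
    = countCol matrix c := by
  rw [PySem.List.foldl_pyRange_zero_pyGetD' matrix ([] : List Int)
        (fun count row => if PySem.List.pyGetD row c 0 = 1 then count + 1 else count) 0,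
      PySem.List.foldl_ite_add_one (fun row => PySem.List.pyGetD row c 0 = 1)]
  simp [countCol]

theorem filterMap_if_eq_filter (l : List Int) (p : Int → Prop) [DecidablePred p] :
    l.filterMap (fun j => if p j then some j else none)
      = l.filter (fun j => decide (p j)) := by
  induction l with
  | nil => rfl
  | cons x xs ih =>
    by_cases h : p x <;> simp [h, ih]

-- ===== VERDICT (by name: the statement is the Claim_ definition above) =====
theorem even_cols_spec : Claim_equal_even_cols := by
  intro matrix _ _
  unfold Spec_even_cols even_cols even_cols_alt
  set n : Nat := (PySem.List.pyGetD matrix 0 ([] : List Int)).length with hn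
  -- A side: foldl-append-if is filter over the column range
  have hA :
      (PySem.List.pyRange 0 (n : Int) 1).foldl
        (fun columnList column =>
          let count : Int :=
            (PySem.List.pyRange 0 (matrix.length : Int) 1).foldl
              (fun count row =>
                if PySem.List.pyGetD (PySem.List.pyGetD matrix row ([] : List Int)) column 0 = 1
                then count + 1 else count) 0
          if count % 2 = 0 then columnList ++ [column] else columnList)
        ([] : List Int)
      = (PySem.List.pyRange 0 (n : Int) 1).filter
          (fun c => decide (countCol matrix c % 2 = 0)) := by
    simp only [inner_count_eq]
    exact PySem.List.foldl_append_ite_eq_filter (fun c => countCol matrix c % 2 = 0) _ _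
  rw [hA]
  -- B side: counts = range map of countCol
  have hinit : (List.replicate n (0 : Int))
      = (PySem.List.pyRange 0 (n : Int) 1).map (fun _ => (0 : Int)) := by
    rw [List.map_const']
    congr 1
    simp [PySem.List.length_pyRange_one]
  rw [hinit, counts_fold_eq]
  simp only [zero_add]
  rw [PySem.List.enumerate_eq_map_pyRange (d := (0 : Int))]
  simp only [PySem.List.len_eq, List.length_map, PySem.List.length_pyRange_one, List.filterMap_map]
  have hlen : ((((n : Int)) - 0).toNat : Int) = (n : Int) := by omega
  rw [hlen]
  have hcong :
      (PySem.List.pyRange 0 (n : Int) 1).filterMap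
        (fun j =>
          (fun p => if p.2 % 2 = 0 then some p.1 else none)
            ((fun j => (j, PySem.List.pyGetD
                ((PySem.List.pyRange 0 (n : Int) 1).map (fun c => countCol matrix c)) j 0)) j))
      = (PySem.List.pyRange 0 (n : Int) 1).filterMap
          (fun j => if countCol matrix j % 2 = 0 then some j else none) := by
    refine List.filterMap_congr (fun j hj => ?_)
    rw [PySem.List.mem_pyRange_one] at hj
    simp only []
    rw [PySem.List.pyGetD_map_pyRange_of_nonneg _ (n : Int) j 0 hj.1 hj.2]
  simp only [Function.comp] at hcong ⊢
  rw [hcong, filterMap_if_eq_filter]
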